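-- pv_equiv track=rewrite | github.com/khaoulaelm/acinetobacter_baumannii_delimitation | GPG_delimitation/asap_partitions.py | build_partition_matrix
-- ===== SOURCE A (Python) =====
-- def build_partition_matrix(strains, group_dict):
--     matrix = []
--     for strain1 in strains:
--         row = []
--         for strain2 in strains:
--             same_group = int(group_dict.get(strain1) == group_dict.get(strain2))
--             row.append(same_group)
--         matrix.append(row)
--     return matrix
-- ===== SOURCE B (Python) =====
-- def build_partition_matrix(strains, group_dict):
--     # One pass to label each position, one grouping pass collecting the indices
--     # of each label, then each row is built from its group's index set.
--     labels = [group_dict.get(s) for s in strains]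
--     members = {}
--     for i, lab in enumerate(labels):
--         members[lab] = members.get(lab, []) + [i]
--     n = len(strains)
--     rows = []
--     for lab in labels:
--         idx = set(members[lab])
--         rows.append([1 if j in idx else 0 for j in range(n)])
--     return rows
-- ===== Notes on version B (the rewrite author's own statement) =====
-- stated objective: alternative
-- what changed: Replaces the all-pairs group-equality comparison (two dict lookups per cell) with one labelling pass, a grouping dict from label to index lists, and rows filled by O(1) set membership of the column index in the row's group.
import Mathlib
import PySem

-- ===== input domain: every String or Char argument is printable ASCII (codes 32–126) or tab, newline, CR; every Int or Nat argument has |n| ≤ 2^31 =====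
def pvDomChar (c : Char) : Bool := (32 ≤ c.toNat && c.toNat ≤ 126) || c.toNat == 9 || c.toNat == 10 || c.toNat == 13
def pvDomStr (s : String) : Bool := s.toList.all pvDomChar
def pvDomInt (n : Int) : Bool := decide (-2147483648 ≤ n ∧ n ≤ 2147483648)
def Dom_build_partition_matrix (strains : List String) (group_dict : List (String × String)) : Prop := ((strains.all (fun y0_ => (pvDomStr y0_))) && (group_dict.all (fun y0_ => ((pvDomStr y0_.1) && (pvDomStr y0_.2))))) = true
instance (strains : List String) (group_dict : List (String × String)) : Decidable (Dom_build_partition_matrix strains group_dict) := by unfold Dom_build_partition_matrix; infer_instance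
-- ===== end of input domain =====

-- B groups positions by label once and builds each row by set membership in its group's index set,
-- instead of A's all-pairs comparison of dict lookups (objective: alternative decomposition).

-- ===== PORT A =====
def build_partition_matrix (strains : List String) (group_dict : List (String × String)) : List (List Int) :=
  let gd := PySem.Dict.mk group_dict
  strains.foldl (fun matrix strain1 =>
    matrix ++ [strains.foldl (fun row strain2 =>
      row ++ [if gd.get? strain1 = gd.get? strain2 then (1 : Int) else 0]) []]) []

-- ===== PORT B =====
def build_partition_matrix_alt (strains : List String) (group_dict : List (String × String)) : List (List Int) :=
  let gd := PySem.Dict.mk group_dict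
  let labels := strains.map (fun s => gd.get? s)
  let members := (PySem.List.enumerate labels 0).foldl
    (fun d p => d.modify p.2 [] (fun v => v ++ [p.1])) PySem.Dict.empty
  let n := PySem.List.len strains
  -- members.getD lab [] is exact for Python's members[lab]: every lab drawn from
  -- labels was inserted by the grouping loop, so the KeyError branch is unreachable.
  labels.foldl (fun rows lab =>
    let idx := PySem.Set.ofList (members.getD lab [])
    rows ++ [(PySem.List.pyRange 0 n 1).map (fun j =>
      if idx.contains j then (1 : Int) else 0)]) []

-- ===== PRECONDITION & SPEC =====
def Spec_build_partition_matrix (strains : List String) (group_dict : List (String × String)) (out : List (List Int)) : Prop := out = build_partition_matrix_alt strains group_dict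
instance (strains : List String) (group_dict : List (String × String)) (out : List (List Int)) : Decidable (Spec_build_partition_matrix strains group_dict out) := by unfold Spec_build_partition_matrix; infer_instance

-- ===== CLAIM (what is proved, stated in full; the proofs are below) =====
def Claim_equal_build_partition_matrix : Prop := ∀ (strains : List String) (group_dict : List (String × String)), Dom_build_partition_matrix strains group_dict → Spec_build_partition_matrix strains group_dict (build_partition_matrix strains group_dict)

-- ===== LEMMAS AND PROOFS =====

-- The grouping dict maps each label to the (increasing) list of positions carrying it.
theorem members_getD (labels : List (Option String)) (lab : Option String) :
    ((PySem.List.enumerate labels 0).foldl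
      (fun d p => d.modify p.2 [] (fun v => v ++ [p.1])) PySem.Dict.empty).getD lab []
    = (((PySem.List.enumerate labels 0).map Prod.swap).filter (fun q => q.1 == lab)).map (·.2) := by
  have h := PySem.Dict.getD_foldl_modify_append ((PySem.List.enumerate labels 0).map Prod.swap)
    PySem.Dict.empty lab
  rw [List.foldl_map] at h
  simpa [Prod.swap, PySem.Dict.getD_empty] using h

-- Position t is in label lab's index list iff labels[t] = lab.
theorem contains_members (labels : List (Option String)) (lab : Option String)
    (t : Nat) (ht : t < labels.length) :
    (PySem.Set.ofList ((((PySem.List.enumerate labels 0).map Prod.swap).filter (fun q => q.1 == lab)).map (·.2))).contains ((t : Nat) : Int)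
    = decide (labels[t] = lab) := by
  have hc : ∀ (s : PySem.Set Int) (x : Int), PySem.Set.contains s x = decide (x ∈ s) := by
    intro s x; simp [PySem.Set.contains]
  rw [hc, decide_eq_decide, PySem.Set.mem_ofList]
  simp only [List.mem_map, List.mem_filter, PySem.List.mem_enumerate_iff]
  constructor
  · rintro ⟨q, ⟨⟨p, ⟨k, hk, rfl⟩, rfl⟩, hq⟩, h2⟩
    simp [Prod.swap] at hq h2
    have : k = t := by omega
    subst this
    simpa using hq
  · intro h
    exact ⟨(lab, (t : Int)), ⟨⟨((t : Int), labels[t]), ⟨t, ht, by simp⟩, by simp [Prod.swap, h]⟩, by simp⟩, rfl⟩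

theorem build_partition_matrix_eq_alt (strains : List String) (group_dict : List (String × String)) :
    build_partition_matrix strains group_dict = build_partition_matrix_alt strains group_dict := by
  unfold build_partition_matrix build_partition_matrix_alt
  simp only [PySem.List.foldl_append_singleton_eq_map, List.nil_append, List.map_map]
  apply List.map_congr_left
  intro s1 _
  apply List.ext_getElem
  · simp [PySem.List.length_pyRange_one, PySem.List.len_eq]
  · intro t h1 h2
    have ht : t < strains.length := by simpa using h1
    simp only [List.getElem_map, Function.comp, PySem.List.getElem_pyRange_one, zero_add]
    rw [members_getD, contains_members _ _ t (by simpa using h1)]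
    simp only [List.getElem_map]
    by_cases h : PySem.Dict.get? (PySem.Dict.mk group_dict) s1 = PySem.Dict.get? (PySem.Dict.mk group_dict) strains[t]
    · simp [h]
    · simp [h, Ne.symm h]

-- ===== VERDICT (by name: the statement is the Claim_ definition above) =====
theorem build_partition_matrix_spec : Claim_equal_build_partition_matrix := by
  intro strains group_dict _
  exact build_partition_matrix_eq_alt strains group_dict
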